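-- pv_equiv track=rewrite | github.com/Laudarisd/leetcode | python_leetcode/array/longest_harmonic_subsequence.py | findHS
-- ===== SOURCE A (Python) =====
-- from typing import List
--
-- def findHS(nums: List[int]) -> int:
--     freq = {}
--     for num in nums:
--         if num in freq:
--             freq[num] += 1
--         else:
--             freq[num] = 1
--     max_length = 0
--     for num in freq:
--         if num + 1 in freq:
--             max_length = max(max_length, freq[num] + freq[num + 1])
--     return max_length
-- ===== SOURCE B (Python) =====
-- def findHS(nums):
--     cnt = {}
--     best = 0
--     for x in nums:
--         cnt[x] = cnt.get(x, 0) + 1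
--         if x + 1 in cnt:
--             best = max(best, cnt[x] + cnt[x + 1])
--         if x - 1 in cnt:
--             best = max(best, cnt[x - 1] + cnt[x])
--     return best
-- ===== Notes on version B (the rewrite author's own statement) =====
-- stated objective: alternative
-- what changed: B replaces A's two-phase build-a-frequency-dict-then-scan-its-keys approach with a single streaming pass that maintains the counter and the running answer together, checking both value neighbours (x-1 and x+1) as each element arrives.
import Mathlib
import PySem

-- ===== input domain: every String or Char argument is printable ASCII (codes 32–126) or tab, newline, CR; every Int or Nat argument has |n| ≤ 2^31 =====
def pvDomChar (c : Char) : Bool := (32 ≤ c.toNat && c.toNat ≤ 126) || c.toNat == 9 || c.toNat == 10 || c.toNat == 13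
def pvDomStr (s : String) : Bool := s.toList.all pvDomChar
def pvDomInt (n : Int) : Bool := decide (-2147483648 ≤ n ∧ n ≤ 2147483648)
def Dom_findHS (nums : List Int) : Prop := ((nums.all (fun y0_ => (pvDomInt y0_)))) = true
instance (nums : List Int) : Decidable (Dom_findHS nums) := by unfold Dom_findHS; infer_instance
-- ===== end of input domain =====

-- B replaces A's two-phase build-counter-then-scan-keys with one streaming pass that keeps the
-- running answer up to date by checking both value neighbours of each arriving element (alternative, same cost).

-- ===== PORT A =====
def findHS (nums : List Int) : Int :=
  let freq := nums.foldl
    (fun freq num =>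
      if freq.contains num then freq.modify num 0 (· + 1) else freq.insert num 1)
    (PySem.Dict.empty : PySem.Dict Int Int)
  -- 'for num in freq' iterates the keys; freq[num] / freq[num+1] are lookups of present keys,
  -- ported as getD _ 0 (exact here: num is a key and num+1 was just checked).
  freq.keys.foldl
    (fun maxLength num =>
      if freq.contains (num + 1) then max maxLength (freq.getD num 0 + freq.getD (num + 1) 0)
      else maxLength)
    0

-- ===== PORT B =====
def findHS_alt (nums : List Int) : Int :=
  (nums.foldl
    (fun (st : PySem.Dict Int Int × Int) x =>
      let cnt := st.1.insert x (st.1.getD x 0 + 1)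
      let best1 := if cnt.contains (x + 1) then max st.2 (cnt.getD x 0 + cnt.getD (x + 1) 0) else st.2
      let best2 := if cnt.contains (x - 1) then max best1 (cnt.getD (x - 1) 0 + cnt.getD x 0) else best1
      (cnt, best2))
    ((PySem.Dict.empty : PySem.Dict Int Int), 0)).2

-- ===== PRECONDITION & SPEC =====
def Spec_findHS (nums : List Int) (out : Int) : Prop := out = findHS_alt nums
instance (nums : List Int) (out : Int) : Decidable (Spec_findHS nums out) := by unfold Spec_findHS; infer_instance

-- ===== CLAIM (what is proved, stated in full; the proofs are below) =====
def Claim_equal_findHS : Prop := ∀ (nums : List Int), Dom_findHS nums → Spec_findHS nums (findHS nums)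

-- ===== LEMMAS AND PROOFS =====

/-- The "max over harmonious pairs" step, with counts and membership taken in `p`. -/
def hstep (p : List Int) (m v : Int) : Int :=
  if (v + 1) ∈ p then max m ((p.count v : Int) + (p.count (v + 1) : Int)) else m

/-- Best harmonious length of `p`: fold of `hstep p` over `p` itself. -/
def best (p : List Int) : Int := p.foldl (hstep p) 0

lemma le_hstep (p : List Int) (m v : Int) : m ≤ hstep p m v := by
  unfold hstep; split_ifs <;> simp

lemma le_hfold_init (p : List Int) (l : List Int) (a : Int) : a ≤ l.foldl (hstep p) a := by
  induction l generalizing a with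
  | nil => simp
  | cons v l ih => exact le_trans (le_hstep p a v) (ih _)

lemma hfold_le (p : List Int) (l : List Int) {a X : Int} (ha : a ≤ X)
    (h : ∀ v ∈ l, (v + 1) ∈ p → (p.count v : Int) + (p.count (v + 1) : Int) ≤ X) :
    l.foldl (hstep p) a ≤ X := by
  induction l generalizing a with
  | nil => simpa using ha
  | cons v l ih =>
    simp only [List.foldl_cons]
    refine ih ?_ (fun w hw => h w (List.mem_cons_of_mem _ hw))
    unfold hstep; split_ifs with hc
    · exact max_le ha (h v (List.mem_cons_self) hc)
    · exact ha

lemma le_hfold_mem (p : List Int) (l : List Int) (a : Int) {v : Int}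
    (hv : v ∈ l) (hc : (v + 1) ∈ p) :
    (p.count v : Int) + (p.count (v + 1) : Int) ≤ l.foldl (hstep p) a := by
  induction l generalizing a with
  | nil => cases hv
  | cons w l ih =>
    simp only [List.foldl_cons]
    rcases List.mem_cons.mp hv with rfl | hv'
    · refine le_trans ?_ (le_hfold_init p l _)
      unfold hstep; simp [hc]
    · exact ih _ hv'

lemma hfold_mem_iff (p : List Int) {l₁ l₂ : List Int} (h : ∀ v, v ∈ l₁ ↔ v ∈ l₂) (a : Int) :
    l₁.foldl (hstep p) a = l₂.foldl (hstep p) a := by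
  refine le_antisymm ?_ ?_
  · exact hfold_le p l₁ (le_hfold_init p l₂ a)
      (fun v hv hc => le_hfold_mem p l₂ a ((h v).mp hv) hc)
  · exact hfold_le p l₂ (le_hfold_init p l₁ a)
      (fun v hv hc => le_hfold_mem p l₁ a ((h v).mpr hv) hc)

lemma buildA_eq_counter (nums : List Int) :
    nums.foldl
      (fun freq num =>
        if freq.contains num then freq.modify num 0 (· + 1) else freq.insert num 1)
      (PySem.Dict.empty : PySem.Dict Int Int) = PySem.Dict.counter nums := by
  have hstepeq : ∀ (d : PySem.Dict Int Int) (x : Int),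
      (if d.contains x then d.modify x 0 (· + 1) else d.insert x 1) = d.modify x 0 (· + 1) := by
    intro d x
    by_cases hc : d.contains x
    · simp [hc]
    · have hc' : d.contains x = false := by simpa using hc
      simp only [hc', Bool.false_eq_true, if_false]
      simp [PySem.Dict.modify, PySem.Dict.getD_of_not_contains d 0 hc']
  rw [PySem.Dict.counter_eq_foldl]
  exact List.foldl_ext _ _ _ (fun d x _ => hstepeq d x)

lemma A_eq_best (nums : List Int) : findHS nums = best nums := by
  unfold findHS
  simp only [buildA_eq_counter]
  have h1 : (PySem.Dict.counter nums).keys.foldl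
      (fun maxLength num =>
        if (PySem.Dict.counter nums).contains (num + 1) then
          max maxLength ((PySem.Dict.counter nums).getD num 0 + (PySem.Dict.counter nums).getD (num + 1) 0)
        else maxLength) 0
      = (PySem.Dict.counter nums).keys.foldl (hstep nums) 0 := by
    refine List.foldl_ext _ _ _ (fun m v _ => ?_)
    by_cases hm : (v + 1) ∈ nums <;>
      simp [hstep, PySem.Dict.contains_counter, PySem.Dict.getD_counter, hm]
  rw [h1]
  refine hfold_mem_iff nums (fun v => ?_) 0
  simp [PySem.Dict.keys_counter]

lemma count_append_singleton (p : List Int) (x v : Int) :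
    ((p ++ [x]).count v : Int) = (p.count v : Int) + (if x = v then 1 else 0) := by
  rw [List.count_append]
  by_cases h : x = v
  · subst h
    simp
  · rw [List.count_singleton]
    simp [h]

lemma counter_append_insert (p : List Int) (x : Int) :
    PySem.Dict.counter (p ++ [x]) =
      (PySem.Dict.counter p).insert x ((PySem.Dict.counter p).getD x 0 + 1) := by
  rw [← PySem.Dict.foldl_insert_getD_add_one_eq_counter,
      ← PySem.Dict.foldl_insert_getD_add_one_eq_counter, List.foldl_append]
  rfl

lemma le_ite_max {c : Prop} [Decidable c] {m t : Int} : m ≤ if c then max m t else m := by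
  split_ifs
  · exact le_max_left _ _
  · exact le_rfl

lemma best_append (p : List Int) (x : Int) :
    best (p ++ [x]) =
      (fun m => if (x - 1) ∈ p ++ [x] then
          max m (((p ++ [x]).count (x - 1) : Int) + ((p ++ [x]).count x : Int)) else m)
      ((fun m => if (x + 1) ∈ p ++ [x] then
          max m (((p ++ [x]).count x : Int) + ((p ++ [x]).count (x + 1) : Int)) else m)
      (best p)) := by
  have hx1 : x - 1 + 1 = x := by ring
  have hcount_le : ∀ v : Int, (p.count v : Int) ≤ ((p ++ [x]).count v : Int) := by
    intro v; rw [count_append_singleton]; split_ifs <;> omega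
  have hcount_ne : ∀ v : Int, v ≠ x → ((p ++ [x]).count v : Int) = (p.count v : Int) := by
    intro v hv; rw [count_append_singleton]; simp [Ne.symm hv]
  show best (p ++ [x]) =
      (if (x - 1) ∈ p ++ [x] then
          max (if (x + 1) ∈ p ++ [x] then
                max (best p) (((p ++ [x]).count x : Int) + ((p ++ [x]).count (x + 1) : Int))
              else best p)
            (((p ++ [x]).count (x - 1) : Int) + ((p ++ [x]).count x : Int))
        else (if (x + 1) ∈ p ++ [x] then
                max (best p) (((p ++ [x]).count x : Int) + ((p ++ [x]).count (x + 1) : Int))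
              else best p))
  set t1 : Int := ((p ++ [x]).count x : Int) + ((p ++ [x]).count (x + 1) : Int) with ht1
  set t2 : Int := ((p ++ [x]).count (x - 1) : Int) + ((p ++ [x]).count x : Int) with ht2
  set M1 : Int := if (x + 1) ∈ p ++ [x] then max (best p) t1 else best p with hM1
  set R : Int := if (x - 1) ∈ p ++ [x] then max M1 t2 else M1 with hR
  have hbM1 : best p ≤ M1 := by rw [hM1]; exact le_ite_max
  have hM1R : M1 ≤ R := by rw [hR]; exact le_ite_max
  refine le_antisymm ?_ ?_
  · -- best (p ++ [x]) ≤ R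
    refine hfold_le (p ++ [x]) (p ++ [x]) (le_trans (le_hfold_init p p 0) (le_trans hbM1 hM1R)) ?_
    intro v hv hc
    by_cases hvx : v = x
    · have hc' : (x + 1) ∈ p ++ [x] := hvx ▸ hc
      have hT : M1 = max (best p) t1 := by rw [hM1, if_pos hc']
      rw [hvx, ← ht1]
      exact le_trans (le_trans (le_max_right (best p) t1) (le_of_eq hT.symm)) hM1R
    · by_cases hvx1 : v = x - 1
      · have hvv : v + 1 = x := by omega
        have hmem : (x - 1) ∈ p ++ [x] := hvx1 ▸ hv
        have hT : R = max M1 t2 := by rw [hR, if_pos hmem]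
        rw [hvv, hvx1, ← ht2, hT]
        exact le_max_right _ _
      · have hvp : v ∈ p := by
          rcases List.mem_append.mp hv with h | h
          · exact h
          · exact absurd (List.mem_singleton.mp h) hvx
        have hv1x : v + 1 ≠ x := fun h => hvx1 (by omega)
        have hcp : (v + 1) ∈ p := by
          rcases List.mem_append.mp hc with h | h
          · exact h
          · exact absurd (List.mem_singleton.mp h) hv1x
        calc ((p ++ [x]).count v : Int) + ((p ++ [x]).count (v + 1) : Int)
            = (p.count v : Int) + (p.count (v + 1) : Int) := by
              rw [hcount_ne v hvx, hcount_ne (v + 1) hv1x]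
          _ ≤ best p := le_hfold_mem p p 0 hvp hcp
          _ ≤ M1 := hbM1
          _ ≤ R := hM1R
  · -- R ≤ best (p ++ [x])
    have hbest : best p ≤ best (p ++ [x]) := by
      refine hfold_le p p (le_hfold_init (p ++ [x]) (p ++ [x]) 0) ?_
      intro v hv hc
      have hv' : v ∈ p ++ [x] := List.mem_append_left _ hv
      have hc' : (v + 1) ∈ p ++ [x] := List.mem_append_left _ hc
      refine le_trans ?_ (le_hfold_mem (p ++ [x]) (p ++ [x]) 0 hv' hc')
      have := hcount_le v; have := hcount_le (v + 1); omega
    have hxmem : x ∈ p ++ [x] := by simp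
    have ht1le : (x + 1) ∈ p ++ [x] → t1 ≤ best (p ++ [x]) := fun h =>
      le_hfold_mem (p ++ [x]) (p ++ [x]) 0 hxmem h
    have ht2le : (x - 1) ∈ p ++ [x] → t2 ≤ best (p ++ [x]) := by
      intro h
      have := le_hfold_mem (p ++ [x]) (p ++ [x]) 0 h (by rw [hx1]; exact hxmem)
      rwa [hx1] at this
    have hM1le : M1 ≤ best (p ++ [x]) := by
      rw [hM1]; split_ifs with h1
      · exact max_le hbest (ht1le h1)
      · exact hbest
    rw [hR]; split_ifs with h2
    · exact max_le hM1le (ht2le h2)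
    · exact hM1le

lemma B_inv (p : List Int) :
    p.foldl
      (fun (st : PySem.Dict Int Int × Int) x =>
        let cnt := st.1.insert x (st.1.getD x 0 + 1)
        let best1 := if cnt.contains (x + 1) then max st.2 (cnt.getD x 0 + cnt.getD (x + 1) 0) else st.2
        let best2 := if cnt.contains (x - 1) then max best1 (cnt.getD (x - 1) 0 + cnt.getD x 0) else best1
        (cnt, best2))
      ((PySem.Dict.empty : PySem.Dict Int Int), 0) = (PySem.Dict.counter p, best p) := by
  induction p using List.reverseRecOn with
  | nil => rfl
  | append_singleton p x ih =>
    rw [List.foldl_append, ih]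
    simp only [List.foldl_cons, List.foldl_nil]
    rw [← counter_append_insert]
    have hx1 : x - 1 + 1 = x := by ring
    refine Prod.ext rfl ?_
    rw [best_append]
    simp [PySem.Dict.contains_counter, PySem.Dict.getD_counter]

-- ===== VERDICT (by name: the statement is the Claim_ definition above) =====
theorem findHS_spec : Claim_equal_findHS := by
  intro nums _
  show findHS nums = findHS_alt nums
  rw [A_eq_best]
  unfold findHS_alt
  rw [B_inv]
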